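-- pv_equiv track=rewrite | github.com/i-lijun/UnsupConstParseEval | add_punct.py | tokens_to_str
-- ===== SOURCE A (Python) =====
-- from typing import List, IO
--
-- def tokens_to_str(tokens: List[str]) -> str:
--     '''
--     Concatenate the tokens of a parse tree to a string and add spaces properly.
--
--     A space is added if and only if:
--     - Before ( or non-paren
--     - After ) or non-paren
--     - Not after (
--
--     @param tokens: a `list` of tokens
--     @return: the concatenated `str`
--     '''
--     line = ''
--     sp = False
--     for token in tokens:
--         if token == '(':
--             if sp:
--                 line += ' '
--                 sp = False
--             line += '('
--         elif token == ')':
--             sp = True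
--             line += ')'
--         else:
--             if sp:
--                 line += ' '
--             else:
--                 sp = True
--             line += token
--     return line
-- ===== SOURCE B (Python) =====
-- def tokens_to_str(tokens):
--     if not tokens:
--         return ''
--     parts = [tokens[0]]
--     for prev, cur in zip(tokens, tokens[1:]):
--         parts.append(cur if prev == '(' or cur == ')' else ' ' + cur)
--     return ''.join(parts)
-- ===== Notes on version B (the rewrite author's own statement) =====
-- stated objective: simpler
-- what changed: Replaces the stateful sp flag with a stateless pairwise rule over zip(tokens, tokens[1:]) (space before cur iff prev != '(' and cur != ')'), collecting parts and joining once.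
import Mathlib
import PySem

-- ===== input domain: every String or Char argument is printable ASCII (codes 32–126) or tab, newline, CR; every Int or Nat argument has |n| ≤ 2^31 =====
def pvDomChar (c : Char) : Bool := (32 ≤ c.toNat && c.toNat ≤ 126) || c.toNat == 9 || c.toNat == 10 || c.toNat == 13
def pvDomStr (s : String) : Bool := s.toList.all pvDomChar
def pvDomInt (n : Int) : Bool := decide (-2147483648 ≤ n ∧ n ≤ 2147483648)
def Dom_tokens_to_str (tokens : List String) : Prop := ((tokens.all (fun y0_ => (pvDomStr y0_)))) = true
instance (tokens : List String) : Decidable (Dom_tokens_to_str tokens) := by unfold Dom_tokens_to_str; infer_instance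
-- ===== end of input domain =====

-- B replaces A's stateful sp flag with a stateless pairwise separator rule (simpler decomposition; same cost).


-- ===== PORT A =====
-- one iteration of A's loop over state (line, sp)
def aStep (st : String × Bool) (token : String) : String × Bool :=
  if token = "(" then
    (if st.2 then ((st.1 ++ " ") ++ "(", false) else (st.1 ++ "(", false))
  else if token = ")" then
    (st.1 ++ ")", true)
  else
    (if st.2 then ((st.1 ++ " ") ++ token, true) else (st.1 ++ token, true))

def tokens_to_str (tokens : List String) : String :=
  (tokens.foldl aStep ("", false)).1

-- ===== PORT B =====
-- the piece appended for cur given the previous token prev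
def bPiece (prev cur : String) : String :=
  if prev = "(" ∨ cur = ")" then cur else " " ++ cur

def tokens_to_str_alt (tokens : List String) : String :=
  match tokens with
  | [] => ""
  | t :: _ =>
    let parts := t :: ((tokens.zip tokens.tail).map (fun pc => bPiece pc.1 pc.2))
    parts.foldl (· ++ ·) ""

-- ===== PRECONDITION & SPEC =====
def Spec_tokens_to_str (tokens : List String) (out : String) : Prop := out = tokens_to_str_alt tokens
instance (tokens : List String) (out : String) : Decidable (Spec_tokens_to_str tokens out) := by unfold Spec_tokens_to_str; infer_instance

-- ===== CLAIM (what is proved, stated in full; the proofs are below) =====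
def Claim_equal_tokens_to_str : Prop := ∀ (tokens : List String), Dom_tokens_to_str tokens → Spec_tokens_to_str tokens (tokens_to_str tokens)

-- ===== LEMMAS AND PROOFS =====

-- concatenation of the pieces for ts with previous token p
def restB (p : String) (ts : List String) : String :=
  match ts with
  | [] => ""
  | c :: ts' => bPiece p c ++ restB c ts'

theorem aStep_eq (line p c : String) :
    aStep (line, decide (¬ p = "(")) c = (line ++ bPiece p c, decide (¬ c = "(")) := by
  by_cases hp : p = "(" <;> by_cases hc : c = "(" <;> by_cases hr : c = ")" <;>
    simp_all [aStep, bPiece, String.append_assoc]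

theorem foldl_aStep (ts : List String) (p line : String) :
    (ts.foldl aStep (line, decide (¬ p = "("))).1 = line ++ restB p ts := by
  induction ts generalizing p line with
  | nil => simp [restB]
  | cons c ts ih =>
    simp only [List.foldl_cons, aStep_eq, restB]
    rw [ih c (line ++ bPiece p c), String.append_assoc]

theorem aStep_first (t : String) :
    aStep ("", false) t = (t, decide (¬ t = "(")) := by
  by_cases h1 : t = "(" <;> by_cases h2 : t = ")" <;> simp_all [aStep]

theorem zip_foldl (ts : List String) (p acc : String) :
    List.foldl (· ++ ·) acc (((p :: ts).zip ts).map (fun pc => bPiece pc.1 pc.2)) = acc ++ restB p ts := by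
  induction ts generalizing p acc with
  | nil => simp [restB]
  | cons c ts ih =>
    simp only [List.zip_cons_cons, List.map_cons, List.foldl_cons, restB]
    rw [ih c (acc ++ bPiece p c), String.append_assoc]

theorem alt_eq_restB (t : String) (ts : List String) :
    tokens_to_str_alt (t :: ts) = t ++ restB t ts := by
  simp only [tokens_to_str_alt, List.tail_cons, List.foldl_cons]
  rw [zip_foldl]
  simp

-- ===== VERDICT (by name: the statement is the Claim_ definition above) =====
theorem tokens_to_str_spec : Claim_equal_tokens_to_str := by
  intro tokens _
  unfold Spec_tokens_to_str
  cases tokens with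
  | nil => rfl
  | cons t ts =>
    rw [alt_eq_restB, tokens_to_str, List.foldl_cons, aStep_first, foldl_aStep]
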